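-- pv_equiv track=rewrite | github.com/HEchooo/product-predict | preserve_style_translate.py | uniform_bands
-- ===== SOURCE A (Python) =====
-- from typing import Any, Dict, List, Optional, Tuple
--
-- def uniform_bands(mask_h: int, k: int) -> List[Tuple[int,int]]:
--     if k <= 0:
--         return []
--     mask_h = max(1, int(mask_h))
--     base = mask_h // k
--     rem = mask_h % k
--     bands = []
--     y = 0
--     for i in range(k):
--         hh = base + (1 if i < rem else 0)
--         y0, y1 = y, y + max(1, hh)
--         bands.append((y0, y1))
--         y = y1
--     bands[-1] = (bands[-1][0], mask_h)
--     return bands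
-- ===== SOURCE B (Python) =====
-- def uniform_bands(mask_h, k):
--     if k <= 0:
--         return []
--     mask_h = max(1, int(mask_h))
--     base, rem = divmod(mask_h, k)
--     if base == 0:
--         bands = [(i, i + 1) for i in range(k)]
--     else:
--         bands = [(i * base + min(i, rem), (i + 1) * base + min(i + 1, rem))
--                  for i in range(k)]
--     bands[-1] = (bands[-1][0], mask_h)
--     return bands
-- ===== Notes on version B (the rewrite author's own statement) =====
-- stated objective: simpler
-- what changed: Replaces A's running-total loop (accumulating y and appending bands) with an independent closed-form expression per band: y_i = i*base + min(i, rem) when base >= 1, and y_i = i in the degenerate base == 0 case, built as list comprehensions.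
import Mathlib
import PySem

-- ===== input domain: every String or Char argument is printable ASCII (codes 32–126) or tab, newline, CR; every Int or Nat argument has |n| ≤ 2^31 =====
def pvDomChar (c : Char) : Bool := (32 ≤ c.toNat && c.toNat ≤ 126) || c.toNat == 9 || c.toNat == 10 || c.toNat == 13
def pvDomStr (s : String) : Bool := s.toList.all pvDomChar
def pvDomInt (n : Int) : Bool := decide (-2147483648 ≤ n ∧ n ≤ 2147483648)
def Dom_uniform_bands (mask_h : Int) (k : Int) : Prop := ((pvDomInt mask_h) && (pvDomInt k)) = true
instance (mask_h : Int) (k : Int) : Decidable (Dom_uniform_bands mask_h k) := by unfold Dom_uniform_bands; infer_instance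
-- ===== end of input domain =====

-- B replaces A's running-total loop by an independent closed-form expression for each band
-- (two comprehension branches, base = 0 vs base ≥ 1); same return value, objective: alternative/simpler.

-- ===== PORT A =====
-- literal port of A: running y, append each band, then overwrite the last band's end with mask_h
-- (bands[-1] access is safe since k > 0 ⇒ bands ≠ []; ported as dropLast ++ [fixed last])
def uniform_bands (mask_h : Int) (k : Int) : List (Int × Int) :=
  if k ≤ 0 then []
  else
    let m := max 1 mask_h
    let base := PySem.Int.floordiv m k
    let rem := PySem.Int.mod m k
    let st := (PySem.List.pyRange 0 k 1).foldl
      (fun (st : List (Int × Int) × Int) i =>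
        let hh := base + (if i < rem then (1:Int) else 0)
        let y1 := st.2 + max 1 hh
        (st.1 ++ [(st.2, y1)], y1)) ([], 0)
    let bands := st.1
    bands.dropLast ++ [((bands.getLast?.getD (0, 0)).1, m)]

-- ===== PORT B =====
-- port of Source B: per-band closed form, no accumulator; same final bands[-1] overwrite
def uniform_bands_alt (mask_h : Int) (k : Int) : List (Int × Int) :=
  if k ≤ 0 then []
  else
    let m := max 1 mask_h
    let base := PySem.Int.floordiv m k
    let rem := PySem.Int.mod m k
    let bands :=
      if base = 0 then
        (PySem.List.pyRange 0 k 1).map (fun i => (i, i + 1))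
      else
        (PySem.List.pyRange 0 k 1).map
          (fun i => (i * base + min i rem, (i + 1) * base + min (i + 1) rem))
    bands.dropLast ++ [((bands.getLast?.getD (0, 0)).1, m)]

-- ===== PRECONDITION & SPEC =====
def Spec_uniform_bands (mask_h : Int) (k : Int) (out : List (Int × Int)) : Prop := out = uniform_bands_alt mask_h k
instance (mask_h : Int) (k : Int) (out : List (Int × Int)) : Decidable (Spec_uniform_bands mask_h k out) := by unfold Spec_uniform_bands; infer_instance

-- ===== CLAIM (what is proved, stated in full; the proofs are below) =====
def Claim_equal_uniform_bands : Prop := ∀ (mask_h : Int) (k : Int), Dom_uniform_bands mask_h k → Spec_uniform_bands mask_h k (uniform_bands mask_h k)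

-- ===== LEMMAS AND PROOFS =====

-- closed form for A's running y after i iterations
def pvY (base rem i : Int) : Int := if base = 0 then i else i * base + min i rem

lemma pvY_succ (base rem : Int) (hb : 0 ≤ base) (i : Int) :
    pvY base rem i + max 1 (base + (if i < rem then (1:Int) else 0)) = pvY base rem (i + 1) := by
  have h : (i + 1) * base = i * base + base := by ring
  unfold pvY; rw [h]; split_ifs <;> omega

lemma pv_fold (base rem : Int) (hb : 0 ≤ base) (hr : 0 ≤ rem) (n : Nat) :
    (PySem.List.pyRange 0 (n : Int) 1).foldl
      (fun (st : List (Int × Int) × Int) i =>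
        (st.1 ++ [(st.2, st.2 + max 1 (base + (if i < rem then (1:Int) else 0)))],
         st.2 + max 1 (base + (if i < rem then (1:Int) else 0))))
      ([], 0)
    = ((PySem.List.pyRange 0 (n : Int) 1).map
         (fun i => (pvY base rem i, pvY base rem (i + 1))), pvY base rem (n : Int)) := by
  induction n with
  | zero =>
      rw [PySem.List.pyRange_one_eq_nil (by norm_num)]
      refine Prod.ext (by simp) ?_
      simp only [List.foldl_nil, Nat.cast_zero, pvY]
      split_ifs with h
      · rfl
      · rw [zero_mul]; omega
  | succ n ih =>
      have hsplit : PySem.List.pyRange 0 ((n + 1 : Nat) : Int) 1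
          = PySem.List.pyRange 0 (n : Int) 1 ++ [(n : Int)] := by
        push_cast
        exact PySem.List.pyRange_one_succ_right (by positivity)
      rw [hsplit, List.foldl_append, List.map_append, ih]
      simp only [List.foldl_cons, List.foldl_nil, List.map_cons, List.map_nil]
      refine Prod.ext ?_ ?_
      · simp [pvY_succ base rem hb]
      · push_cast
        exact pvY_succ base rem hb _

-- ===== VERDICT (by name: the statement is the Claim_ definition above) =====
theorem uniform_bands_spec : Claim_equal_uniform_bands := by
  unfold Claim_equal_uniform_bands Spec_uniform_bands
  intro mask_h k _
  unfold uniform_bands uniform_bands_alt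
  by_cases hk : k ≤ 0
  · simp [hk]
  · have hkpos : 0 < k := by omega
    simp only [if_neg hk]
    have hm1 : (1:Int) ≤ max 1 mask_h := le_max_left _ _
    rw [PySem.Int.floordiv_eq_ediv_of_pos hkpos, PySem.Int.mod_eq_emod_of_pos hkpos]
    have hb : 0 ≤ max 1 mask_h / k := Int.ediv_nonneg (by omega) (by omega)
    have hr : 0 ≤ max 1 mask_h % k := Int.emod_nonneg _ (by omega)
    have hk' : ((k.toNat : Nat) : Int) = k := Int.toNat_of_nonneg (le_of_lt hkpos)
    rw [← hk'] at hb hr ⊢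
    rw [pv_fold _ _ hb hr]
    by_cases h0 : max 1 mask_h / ((k.toNat : Nat) : Int) = 0
    · have hf : (fun i : Int => (pvY 0 (max 1 mask_h % ((k.toNat : Nat) : Int)) i,
                   pvY 0 (max 1 mask_h % ((k.toNat : Nat) : Int)) (i + 1)))
           = (fun i : Int => (i, i + 1)) := by
        funext i; simp [pvY]
      simp only [h0, if_pos, hf]
    · have hf : (fun i : Int => (pvY (max 1 mask_h / ((k.toNat : Nat) : Int))
                   (max 1 mask_h % ((k.toNat : Nat) : Int)) i,
                 pvY (max 1 mask_h / ((k.toNat : Nat) : Int))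
                   (max 1 mask_h % ((k.toNat : Nat) : Int)) (i + 1)))
           = (fun i : Int => (i * (max 1 mask_h / ((k.toNat : Nat) : Int))
                   + min i (max 1 mask_h % ((k.toNat : Nat) : Int)),
               (i + 1) * (max 1 mask_h / ((k.toNat : Nat) : Int))
                   + min (i + 1) (max 1 mask_h % ((k.toNat : Nat) : Int)))) := by
        funext i; simp only [pvY, if_neg h0]
      simp only [if_neg h0, hf]
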